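-- pv_equiv track=rewrite | github.com/Eric4848/TIL | algorithm/programmers/연습문제/멀리 뛰기.py | solution
-- ===== SOURCE A (Python) =====
-- def solution(n):
--     answer = 0
--     to = n // 2 + 1
--     factos = [1]
--     facto = 1
--     for i in range(1, n+1):
--         facto *= i
--         factos.append(facto)
--     for i in range(0, to):
--         answer += factos[n-i] // (factos[n-2*i] * factos[i])
--     return answer % 1234567
-- ===== SOURCE B (Python) =====
-- def solution(n):
--     a, b = 0, 1
--     for _ in range(n + 1):
--         a, b = b, (a + b) % 1234567
--     return a
-- ===== Notes on version B (the rewrite author's own statement) =====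
-- stated objective: faster
-- what changed: Replaces the factorial-table-plus-binomial-sum computation of Fib(n+1) with a direct linear Fibonacci iteration keeping values reduced mod 1234567, eliminating the bigint factorials.
import Mathlib
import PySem

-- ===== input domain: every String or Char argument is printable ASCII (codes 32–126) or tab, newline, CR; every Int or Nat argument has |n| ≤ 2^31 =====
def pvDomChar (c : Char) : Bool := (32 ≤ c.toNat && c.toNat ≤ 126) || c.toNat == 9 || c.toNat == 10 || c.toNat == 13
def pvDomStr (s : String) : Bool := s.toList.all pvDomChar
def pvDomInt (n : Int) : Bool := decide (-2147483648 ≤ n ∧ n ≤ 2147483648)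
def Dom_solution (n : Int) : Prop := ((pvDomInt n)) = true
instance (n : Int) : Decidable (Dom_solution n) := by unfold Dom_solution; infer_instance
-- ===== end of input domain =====

-- B replaces A's bigint factorial table and binomial sum by a linear Fibonacci iteration mod 1234567 (faster: asymptotic).

-- ===== PORT A =====
-- A never raises: factos has length n+1 for n ≥ 0 and every index used lies in range
-- (and for n < 0 both loops are empty), so the pyGetD default 0 is never returned.
def solution (n : Int) : Int :=
  let to_ := PySem.Int.floordiv n 2 + 1
  let st := (PySem.List.pyRange 1 (n+1) 1).foldl
      (fun (st : List Int × Int) i => (st.1 ++ [st.2 * i], st.2 * i)) ([1], 1)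
  let factos := st.1
  let answer := (PySem.List.pyRange 0 to_ 1).foldl
      (fun acc i => acc + PySem.Int.floordiv (PySem.List.pyGetD factos (n - i) 0)
        (PySem.List.pyGetD factos (n - 2*i) 0 * PySem.List.pyGetD factos i 0)) 0
  PySem.Int.mod answer 1234567

-- ===== PORT B =====
def solution_alt (n : Int) : Int :=
  let ab := (PySem.List.pyRange 0 (n+1) 1).foldl
      (fun (st : Int × Int) _ => (st.2, PySem.Int.mod (st.1 + st.2) 1234567)) (0, 1)
  ab.1

-- ===== PRECONDITION & SPEC =====
def Spec_solution (n : Int) (out : Int) : Prop := out = solution_alt n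
instance (n : Int) (out : Int) : Decidable (Spec_solution n out) := by unfold Spec_solution; infer_instance

-- ===== CLAIM (what is proved, stated in full; the proofs are below) =====
def Claim_equal_solution : Prop := ∀ (n : Int), Dom_solution n → Spec_solution n (solution n)

-- ===== LEMMAS AND PROOFS =====

-- A's first loop builds the factorial table.
lemma factos_eq (m : Nat) :
    (PySem.List.pyRange 1 ((m:Int)+1) 1).foldl
      (fun (st : List Int × Int) i => (st.1 ++ [st.2 * i], st.2 * i)) ([1], 1)
    = ((List.range (m+1)).map (fun k => ((Nat.factorial k : Nat) : Int)), ((Nat.factorial m : Nat) : Int)) := by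
  induction m with
  | zero => simp [PySem.List.pyRange_one_eq_nil (by norm_num : (1:Int) ≤ 1)]
  | succ m ih =>
    have hc : ((m+1 : Nat) : Int) + 1 = ((m:Int) + 1) + 1 := by push_cast; ring
    rw [hc, PySem.List.pyRange_one_succ_right (by omega : (1:Int) ≤ (m:Int)+1),
      List.foldl_append, ih]
    simp only [List.foldl_cons, List.foldl_nil, Prod.mk.injEq]
    constructor
    · rw [List.range_succ (n := m+1), List.map_append]
      simp [Nat.factorial_succ]
      ring
    · simp [Nat.factorial_succ]
      ring

-- the binomial-sum identity: ∑_{i=0}^{⌊m/2⌋} C(m-i,i) = fib (m+1)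
lemma sum_choose_eq_fib (m : Nat) :
    ∑ i ∈ Finset.range (m/2+1), Nat.choose (m-i) i = Nat.fib (m+1) := by
  rw [Nat.fib_succ_eq_sum_choose, Finset.Nat.sum_antidiagonal_eq_sum_range_succ_mk]
  have hrefl : ∑ j ∈ Finset.range (m+1), Nat.choose (m-j) j
      = ∑ k ∈ Finset.range (m+1), Nat.choose k (m-k) := by
    have h := Finset.sum_range_reflect (fun j => Nat.choose (m-j) j) (m+1)
    rw [← h]
    apply Finset.sum_congr rfl
    intro k hk
    have hk' : k ≤ m := by simpa [Nat.lt_succ_iff] using hk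
    have : m + 1 - 1 - k = m - k := by omega
    rw [this]
    have : m - (m - k) = k := by omega
    rw [this]
  rw [← hrefl]
  apply Finset.sum_subset
  · intro x hx
    simp only [Finset.mem_range] at hx ⊢
    omega
  · intro j hj hj'
    have h1 : j ≤ m := by simpa [Nat.lt_succ_iff] using hj
    have h2 : m/2 + 1 ≤ j := by simpa [Nat.lt_succ_iff] using hj'
    exact Nat.choose_eq_zero_of_lt (by omega)

-- list-sum form of a Finset.range sum
lemma list_sum_range {M : Type} [AddCommMonoid M] (n : Nat) (f : Nat → M) :
    ((List.range n).map f).sum = ∑ i ∈ Finset.range n, f i := by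
  induction n with
  | zero => simp
  | succ n ih =>
    rw [List.range_succ, List.map_append, List.sum_append, Finset.sum_range_succ, ih]
    simp

lemma cast_1234567 : ((1234567 : Nat) : Int) = (1234567 : Int) := by norm_num

-- A's value on nonnegative input is fib (m+1) mod 1234567
lemma solution_nonneg (m : Nat) : solution (m : Int) = ((Nat.fib (m+1) % 1234567 : Nat) : Int) := by
  simp only [solution, factos_eq m]
  have hto : PySem.Int.floordiv (m : Int) 2 + 1 = ((m/2 + 1 : Nat) : Int) := by
    have h := PySem.Int.floordiv_natCast m 2
    push_cast at h ⊢
    omega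
  rw [hto, PySem.List.pyRange_zero_nat, List.foldl_map]
  have hbody : List.foldl
      (fun acc (k : Nat) => acc + PySem.Int.floordiv
        (PySem.List.pyGetD ((List.range (m+1)).map (fun k => ((Nat.factorial k : Nat) : Int))) ((m:Int) - (k:Int)) 0)
        (PySem.List.pyGetD ((List.range (m+1)).map (fun k => ((Nat.factorial k : Nat) : Int))) ((m:Int) - 2*(k:Int)) 0 *
         PySem.List.pyGetD ((List.range (m+1)).map (fun k => ((Nat.factorial k : Nat) : Int))) ((k:Int)) 0)) 0 (List.range (m/2+1))
      = List.foldl (fun acc (k : Nat) => acc + ((Nat.choose (m-k) k : Nat) : Int)) 0 (List.range (m/2+1)) := by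
    apply PySem.List.foldl_congr_mem
    intro acc k hk
    have hk2 : 2*k ≤ m := by
      have : k < m/2 + 1 := List.mem_range.mp hk
      omega
    have e1 : (m:Int) - (k:Int) = ((m - k : Nat) : Int) := by omega
    have e2 : (m:Int) - 2*(k:Int) = ((m - 2*k : Nat) : Int) := by omega
    rw [e1, e2, PySem.List.pyGetD_natCast, PySem.List.pyGetD_natCast, PySem.List.pyGetD_natCast,
      PySem.List.getD_map_range _ _ _ _ (by omega), PySem.List.getD_map_range _ _ _ _ (by omega),
      PySem.List.getD_map_range _ _ _ _ (by omega)]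
    congr 1
    have hprod : ((Nat.factorial (m-2*k) : Nat) : Int) * ((Nat.factorial k : Nat) : Int)
        = (((Nat.factorial (m-2*k) * Nat.factorial k : Nat)) : Int) := by push_cast; ring
    rw [hprod, PySem.Int.floordiv_natCast]
    congr 1
    rw [Nat.choose_eq_factorial_div_factorial (by omega : k ≤ m - k)]
    congr 1
    · rw [mul_comm]
      congr 2
      omega
  rw [hbody, PySem.List.foldl_add, zero_add]
  have hcs : ((List.range (m/2+1)).map (fun k => ((Nat.choose (m-k) k : Nat) : Int))).sum
      = ((((List.range (m/2+1)).map (fun k => Nat.choose (m-k) k)).sum : Nat) : Int) := by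
    rw [Nat.cast_list_sum, List.map_map]
    rfl
  rw [hcs, list_sum_range, sum_choose_eq_fib, ← cast_1234567, PySem.Int.mod_natCast]

-- B's loop invariant: after k steps the state is (fib k, fib (k+1)), both mod 1234567
lemma fibloop (k : Nat) :
    (List.range k).foldl (fun (st : Int × Int) _ => (st.2, PySem.Int.mod (st.1 + st.2) 1234567)) (0, 1)
      = (((Nat.fib k % 1234567 : Nat) : Int), ((Nat.fib (k+1) % 1234567 : Nat) : Int)) := by
  induction k with
  | zero => simp
  | succ k ih =>
    rw [List.range_succ, List.foldl_append, ih]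
    simp only [List.foldl_cons, List.foldl_nil, Prod.mk.injEq]
    refine ⟨trivial, ?_⟩
    have hsum : ((Nat.fib k % 1234567 : Nat) : Int) + ((Nat.fib (k+1) % 1234567 : Nat) : Int)
        = (((Nat.fib k % 1234567 + Nat.fib (k+1) % 1234567 : Nat)) : Int) := by push_cast; ring
    rw [hsum, ← cast_1234567, PySem.Int.mod_natCast]
    congr 1
    rw [← Nat.add_mod, Nat.fib_add_two]

-- B's value on nonnegative input
lemma solution_alt_nonneg (m : Nat) : solution_alt (m : Int) = ((Nat.fib (m+1) % 1234567 : Nat) : Int) := by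
  simp only [solution_alt]
  have h : (m:Int) + 1 = ((m + 1 : Nat) : Int) := by push_cast; ring
  rw [h, PySem.List.pyRange_zero_nat, List.foldl_map, fibloop (m+1)]

-- ===== VERDICT (by name: the statement is the Claim_ definition above) =====
theorem solution_spec : Claim_equal_solution := by
  intro n _
  unfold Spec_solution
  by_cases h : 0 ≤ n
  · obtain ⟨m, rfl⟩ := Int.eq_ofNat_of_zero_le h
    rw [solution_nonneg, solution_alt_nonneg]
  · -- both loops are empty for n < 0
    have hn : n < 0 := by omega
    have h1 : n + 1 ≤ 1 := by omega
    have h2 : PySem.Int.floordiv n 2 + 1 ≤ 0 := by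
      have := (PySem.Int.floordiv_lt_iff_lt_mul (a := n) (b := 2) (q := 0) (by norm_num)).mpr
        (by omega)
      omega
    simp only [solution, solution_alt]
    rw [PySem.List.pyRange_one_eq_nil h1, PySem.List.pyRange_one_eq_nil h2,
      PySem.List.pyRange_one_eq_nil (show n + 1 ≤ (0:Int) by omega)]
    simp [PySem.Int.mod]
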